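-- pv_equiv track=rewrite | github.com/ETSnider/ETSnider.github.io | AdventOfCode2021/day15/day15puzzle2.py | part2Map
-- ===== SOURCE A (Python) =====
-- def part2Map(caveMap):
-- 	"""
-- 	Expands the input map to the specifications in part 2.
-- 	Input: n*m array of digits
-- 	Output: 5n*5m array of digits
-- 	"""
-- 	xlen = len(caveMap)
-- 	ylen = len(caveMap[0])
-- 	outMap  = [[0 for j in range(ylen*5)] for i in range(xlen*5)]
-- 	for i in range(xlen):
-- 		for j in range(ylen):
-- 			for xtile in range(5):
-- 				for ytile in range(5):
-- 					overflowCheck = caveMap[i][j] + xtile + ytile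
-- 					if overflowCheck > 9:
-- 						overflowCheck -= 9
-- 					outMap[xtile*xlen + i][ytile*ylen + j] = overflowCheck
-- 	return outMap
-- ===== SOURCE B (Python) =====
-- def part2Map(caveMap):
--     """
--     Expands the n*m input map to the specifications in part 2.
--     A tile's content depends only on xtile+ytile, so precompute the nine
--     distinct shifted copies of the base map once, then assemble each output
--     row by concatenating whole rows of those shared blocks.
--     """
--     width = len(caveMap[0])
--     base = [row[:width] for row in caveMap]
--     shifted = []  # shifted[s][i][j] == wrapped base[i][j] + s, for s = 0..8
--     for s in range(9):
--         shifted.append([[v + s - 9 if v + s > 9 else v + s for v in row]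
--                         for row in base])
--     out = []
--     for xtile in range(5):
--         for i in range(len(base)):
--             r = []
--             for ytile in range(5):
--                 r.extend(shifted[xtile + ytile][i])
--             out.append(r)
--     return out
-- ===== Notes on version B (the rewrite author's own statement) =====
-- stated objective: faster
-- what changed: B exploits that a tile's content depends only on xtile+ytile: it precomputes the nine distinct shifted copies of the base map once and assembles each output row by concatenating whole rows of those shared blocks, instead of A's four nested loops recomputing every one of the 25 tiles cell by cell with scattered indexed writes into a preallocated zero grid.
import Mathlib
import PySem

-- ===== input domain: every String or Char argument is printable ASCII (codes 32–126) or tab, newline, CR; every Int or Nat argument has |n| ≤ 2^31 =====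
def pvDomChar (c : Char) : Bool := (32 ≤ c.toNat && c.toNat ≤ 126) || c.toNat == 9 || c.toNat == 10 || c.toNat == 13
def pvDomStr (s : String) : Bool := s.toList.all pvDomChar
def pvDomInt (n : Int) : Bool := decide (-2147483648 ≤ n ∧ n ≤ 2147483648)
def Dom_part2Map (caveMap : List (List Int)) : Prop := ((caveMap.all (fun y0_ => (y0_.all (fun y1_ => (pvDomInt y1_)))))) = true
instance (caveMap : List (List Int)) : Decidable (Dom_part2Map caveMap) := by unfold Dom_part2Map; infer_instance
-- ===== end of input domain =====

-- B precomputes the nine distinct shifted copies of the base map (a tile depends only on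
-- xtile+ytile) and assembles the grid by concatenating whole block rows, replacing A's
-- 25-tiles-per-cell scatter writes into a preallocated zero grid (objective: faster, constant factor).

-- ===== PORT A =====
-- `outMap[r][c] = v`; the indices are always ≥ 0 here and in range under Pre_ (Python raises IndexError out of range)
def pvWriteA (g : List (List Int)) (r c : Int) (v : Int) : List (List Int) :=
  g.set r.toNat ((g.getD r.toNat []).set c.toNat v)

-- caveMap[0] / caveMap[i][j] read with a default: exact on the in-range accesses Pre_ guarantees (Python raises IndexError otherwise)
def part2Map (caveMap : List (List Int)) : List (List Int) :=
  let xlen : Int := caveMap.length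
  let ylen : Int := (PySem.List.pyGetD caveMap 0 []).length
  let outMap : List (List Int) :=
    (PySem.List.pyRange 0 (xlen * 5) 1).map (fun _ =>
      (PySem.List.pyRange 0 (ylen * 5) 1).map (fun _ => (0 : Int)))
  (PySem.List.pyRange 0 xlen 1).foldl (fun g i =>
    (PySem.List.pyRange 0 ylen 1).foldl (fun g j =>
      (PySem.List.pyRange 0 5 1).foldl (fun g xtile =>
        (PySem.List.pyRange 0 5 1).foldl (fun g ytile =>
          let overflowCheck := PySem.List.pyGetD (PySem.List.pyGetD caveMap i []) j 0 + xtile + ytile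
          let overflowCheck := if overflowCheck > 9 then overflowCheck - 9 else overflowCheck
          pvWriteA g (xtile * xlen + i) (ytile * ylen + j) overflowCheck) g) g) g) outMap

-- ===== PORT B =====
-- the inner comprehension `[v + s - 9 if v + s > 9 else v + s for v in row]`
def pvShiftRow (s : Int) (row : List Int) : List Int :=
  row.map (fun v => if v + s > 9 then v + s - 9 else v + s)

-- caveMap[0] read with a default: exact under Pre_ (Python raises IndexError on the empty map)
def part2Map_alt (caveMap : List (List Int)) : List (List Int) :=
  let width : Int := (PySem.List.pyGetD caveMap 0 []).length
  let base : List (List Int) := caveMap.map (fun row => PySem.List.slice row none (some width))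
  let shifted : List (List (List Int)) :=
    (PySem.List.pyRange 0 9 1).foldl (fun acc s => acc ++ [base.map (pvShiftRow s)]) []
  (PySem.List.pyRange 0 5 1).foldl (fun out xtile =>
    (PySem.List.pyRange 0 (base.length : Int) 1).foldl (fun out i =>
      let r := (PySem.List.pyRange 0 5 1).foldl (fun r ytile =>
        r ++ PySem.List.pyGetD (PySem.List.pyGetD shifted (xtile + ytile) []) i []) []
      out ++ [r]) out) []

-- ===== PRECONDITION & SPEC =====
-- Pre_ is exactly where Python A returns normally: A raises IndexError on the empty
-- map and whenever some row is shorter than the first row (columns are read up to the first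
-- row's width); rows longer than the first are fine (both truncate them).
def Pre_part2Map (caveMap : List (List Int)) : Prop :=
  caveMap ≠ [] ∧ ∀ row ∈ caveMap, (caveMap.headD []).length ≤ row.length
instance (caveMap : List (List Int)) : Decidable (Pre_part2Map caveMap) := by
  unfold Pre_part2Map; infer_instance

def pvWitness_part2Map : List (List Int) := [[8]]

def Spec_part2Map (caveMap : List (List Int)) (out : List (List Int)) : Prop := out = part2Map_alt caveMap
instance (caveMap : List (List Int)) (out : List (List Int)) : Decidable (Spec_part2Map caveMap out) := by unfold Spec_part2Map; infer_instance

-- ===== CLAIM (what is proved, stated in full; the proofs are below) =====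
def Claim_equal_part2Map : Prop := ∀ (caveMap : List (List Int)), Dom_part2Map caveMap → Pre_part2Map caveMap → Spec_part2Map caveMap (part2Map caveMap)

-- ===== LEMMAS AND PROOFS =====

-- the common cell value: wrap9(cave[r mod n][c mod m] + r div n + c div m)
def pvWrap9 (v : Int) : Int := if v > 9 then v - 9 else v

def pvTarget (cave : List (List Int)) (n m r c : Nat) : Int :=
  pvWrap9 ((cave.getD (r % n) []).getD (c % m) 0 + ((r / n : Nat) : Int) + ((c / m : Nat) : Int))

def pvWriteN (g : List (List Int)) (r c : Nat) (v : Int) : List (List Int) :=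
  g.set r ((g.getD r []).set c v)

def pvReadC (g : List (List Int)) (r c : Nat) : Int := (g.getD r []).getD c 0

def pvG0 (n m : Nat) : List (List Int) :=
  (List.range (n * 5)).map (fun _ => (List.range (m * 5)).map (fun _ => (0 : Int)))

def pvCells (n m : Nat) : List (Nat × Nat) :=
  (List.range n).flatMap (fun i => (List.range m).flatMap (fun j =>
    (List.range 5).flatMap (fun xt => (List.range 5).map (fun yt => (xt * n + i, yt * m + j)))))

def pvCellStep (T : Nat → Nat → Int) (g : List (List Int)) (p : Nat × Nat) : List (List Int) :=
  pvWriteN g p.1 p.2 (T p.1 p.2)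

def pvFoldN (cave : List (List Int)) (n m : Nat) : List (List Int) :=
  (List.range n).foldl (fun g i =>
    (List.range m).foldl (fun g j =>
      (List.range 5).foldl (fun g xt =>
        (List.range 5).foldl (fun g yt =>
          pvWriteN g (xt * n + i) (yt * m + j)
            (pvWrap9 ((cave.getD i []).getD j 0 + (xt : Int) + (yt : Int)))) g) g) g) (pvG0 n m)

theorem pvListEqOfGetD {α : Type} (d : α) (l l' : List α) (hlen : l.length = l'.length)
    (h : ∀ k, k < l.length → l.getD k d = l'.getD k d) : l = l' := by
  apply List.ext_getElem hlen
  intro i h1 h2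
  rw [← List.getD_eq_getElem l d h1, ← List.getD_eq_getElem l' d h2, h i h1]

theorem pvWriteN_length (g : List (List Int)) (r c : Nat) (v : Int) :
    (pvWriteN g r c v).length = g.length := by
  simp [pvWriteN]

theorem pvWriteN_rowlen (g : List (List Int)) (r c : Nat) (v : Int) (r' : Nat) :
    ((pvWriteN g r c v).getD r' []).length = (g.getD r' []).length := by
  simp only [pvWriteN, List.getD_eq_getElem?_getD, List.getElem?_set]
  split_ifs with h1 h2 <;> simp_all

theorem pvReadC_writeN_eq (g : List (List Int)) (r c : Nat) (v : Int)
    (hr : r < g.length) (hc : c < (g.getD r []).length) :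
    pvReadC (pvWriteN g r c v) r c = v := by
  have h1 : (pvWriteN g r c v).getD r [] = (g.getD r []).set c v := by
    rw [pvWriteN, List.getD_eq_getElem?_getD, List.getElem?_set]
    simp [hr]
  rw [List.getD_eq_getElem?_getD] at hc
  rw [pvReadC, h1, List.getD_eq_getElem?_getD, List.getElem?_set]
  simp [hc]

theorem pvReadC_writeN_ne (g : List (List Int)) (r c : Nat) (v : Int) (r' c' : Nat)
    (h : ¬(r' = r ∧ c' = c)) :
    pvReadC (pvWriteN g r c v) r' c' = pvReadC g r' c' := by
  unfold pvReadC pvWriteN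
  by_cases hrr : r = r'
  · subst hrr
    have hcc : ¬ c = c' := fun h' => h ⟨rfl, h'.symm⟩
    by_cases hlen : r < g.length
    · have h1 : (g.set r ((g.getD r []).set c v)).getD r [] = (g.getD r []).set c v := by
        rw [List.getD_eq_getElem?_getD, List.getElem?_set]
        simp [hlen]
      rw [h1, List.getD_eq_getElem?_getD, List.getElem?_set, if_neg hcc,
          ← List.getD_eq_getElem?_getD]
    · have h1 : (g.set r ((g.getD r []).set c v)).getD r [] = ([] : List Int) := by
        rw [List.getD_eq_getElem?_getD, List.getElem?_set]
        simp [hlen]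
      have h2 : g.getD r [] = ([] : List Int) := by
        rw [List.getD_eq_getElem?_getD, List.getElem?_eq_none (by omega)]
        rfl
      rw [h1, h2]
  · have h1 : (g.set r ((g.getD r []).set c v)).getD r' [] = g.getD r' [] := by
      rw [List.getD_eq_getElem?_getD, List.getElem?_set, if_neg hrr,
          ← List.getD_eq_getElem?_getD]
    rw [h1]

theorem pvFold_length (T : Nat → Nat → Int) (L : List (Nat × Nat)) (g : List (List Int)) :
    (L.foldl (pvCellStep T) g).length = g.length := by
  induction L generalizing g with
  | nil => rfl
  | cons p L ih =>
    rw [List.foldl_cons, ih]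
    exact pvWriteN_length g p.1 p.2 _

theorem pvFold_rowlen (T : Nat → Nat → Int) (L : List (Nat × Nat)) (g : List (List Int)) (r : Nat) :
    ((L.foldl (pvCellStep T) g).getD r []).length = (g.getD r []).length := by
  induction L generalizing g with
  | nil => rfl
  | cons p L ih =>
    rw [List.foldl_cons, ih]
    exact pvWriteN_rowlen g p.1 p.2 _ r

theorem pvFold_read (T : Nat → Nat → Int) (L : List (Nat × Nat)) (g : List (List Int)) (r c : Nat)
    (hr : r < g.length) (hc : c < (g.getD r []).length) :
    pvReadC (L.foldl (pvCellStep T) g) r c = if (r, c) ∈ L then T r c else pvReadC g r c := by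
  induction L generalizing g with
  | nil => simp
  | cons p L ih =>
    have hr' : r < (pvCellStep T g p).length := by rwa [pvCellStep, pvWriteN_length]
    have hc' : c < ((pvCellStep T g p).getD r []).length := by rwa [pvCellStep, pvWriteN_rowlen]
    rw [List.foldl_cons, ih _ hr' hc']
    by_cases hmem : (r, c) ∈ L
    · simp [hmem]
    · by_cases hp : (r, c) = p
      · subst hp
        simp [hmem, pvCellStep, pvReadC_writeN_eq g r c _ hr hc]
      · have hne : ¬(r = p.1 ∧ c = p.2) := by
          rintro ⟨h1, h2⟩; exact hp (by cases p; simp_all)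
        simp [hmem, hp, pvCellStep, pvReadC_writeN_ne g p.1 p.2 _ r c hne]

theorem pvGetD_headD (l : List (List Int)) : l.getD 0 [] = l.headD [] := by
  cases l <;> rfl

theorem pvGetD_map {α β : Type} (g : α → β) (l : List α) (k : Nat) (hk : k < l.length)
    (d : β) (d' : α) : (l.map g).getD k d = g (l.getD k d') := by
  rw [List.getD_eq_getElem _ _ (by simpa using hk), List.getD_eq_getElem _ _ hk, List.getElem_map]

theorem pvToNatMul (a b c : Nat) : ((a : Int) * (b : Int) + (c : Int)).toNat = a * b + c := by
  omega

theorem pvWriteA_natCast (g : List (List Int)) (a b c d e f : Nat) (v : Int) :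
    pvWriteA g ((a : Int) * (b : Int) + (c : Int)) ((d : Int) * (e : Int) + (f : Int)) v =
      pvWriteN g (a * b + c) (d * e + f) v := by
  unfold pvWriteA pvWriteN
  rw [pvToNatMul, pvToNatMul]

theorem pvIf_eq_wrap9 (x : Int) : (if x > 9 then x - 9 else x) = pvWrap9 x := rfl

set_option maxHeartbeats 1000000 in
theorem pvA_eq_foldN (cave : List (List Int)) :
    part2Map cave = pvFoldN cave cave.length (cave.headD []).length := by
  have h0 : PySem.List.pyGetD cave 0 [] = cave.headD [] := by
    rw [show (0 : Int) = ((0 : Nat) : Int) from rfl, PySem.List.pyGetD_natCast, pvGetD_headD]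
  simp only [part2Map, pvFoldN, pvG0, h0]
  rw [show ((cave.length : Int) * 5) = (((cave.length * 5 : Nat) : Int)) by push_cast; ring,
      show (((cave.headD []).length : Int) * 5) = ((((cave.headD []).length * 5 : Nat) : Int)) by push_cast; ring,
      show (5 : Int) = ((5 : Nat) : Int) from rfl]
  simp only [PySem.List.pyRange_zero_nat, List.map_map, List.foldl_map, Function.comp_def,
    PySem.List.pyGetD_natCast, pvWriteA_natCast, pvIf_eq_wrap9]

set_option maxHeartbeats 1000000 in
theorem pvFoldN_eq_cells (cave : List (List Int)) (n m : Nat) :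
    pvFoldN cave n m = (pvCells n m).foldl (pvCellStep (pvTarget cave n m)) (pvG0 n m) := by
  simp only [pvFoldN, pvCells, List.foldl_flatMap, List.foldl_map]
  apply PySem.List.foldl_congr_mem
  intro acc i hi
  apply PySem.List.foldl_congr_mem
  intro acc2 j hj
  apply PySem.List.foldl_congr_mem
  intro acc3 xt _
  apply PySem.List.foldl_congr_mem
  intro acc4 yt _
  simp only [List.mem_range] at hi hj
  have e1 : (xt * n + i) % n = i := by
    rw [Nat.mul_comm, Nat.mul_add_mod, Nat.mod_eq_of_lt hi]
  have e2 : (xt * n + i) / n = xt := by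
    rw [Nat.mul_comm, Nat.mul_add_div (by omega), Nat.div_eq_of_lt hi, Nat.add_zero]
  have e3 : (yt * m + j) % m = j := by
    rw [Nat.mul_comm, Nat.mul_add_mod, Nat.mod_eq_of_lt hj]
  have e4 : (yt * m + j) / m = yt := by
    rw [Nat.mul_comm, Nat.mul_add_div (by omega), Nat.div_eq_of_lt hj, Nat.add_zero]
  simp only [pvCellStep, pvTarget, e1, e2, e3, e4]

theorem pvMem_cells (n m r c : Nat) (hr : r < n * 5) (hc : c < m * 5) :
    (r, c) ∈ pvCells n m := by
  have hn : 0 < n := by omega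
  have hm : 0 < m := by omega
  have d1 := Nat.div_add_mod r n
  have d2 := Nat.div_add_mod c m
  simp only [pvCells, List.mem_flatMap, List.mem_map, List.mem_range]
  refine ⟨r % n, Nat.mod_lt _ hn, c % m, Nat.mod_lt _ hm, r / n, ?_, c / m, ?_, ?_⟩
  · exact Nat.div_lt_of_lt_mul (by omega)
  · exact Nat.div_lt_of_lt_mul (by omega)
  · rw [Prod.mk.injEq]
    refine ⟨?_, ?_⟩
    · rw [Nat.mul_comm]; exact Nat.div_add_mod r n
    · rw [Nat.mul_comm]; exact Nat.div_add_mod c m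

theorem pvG0_length (n m : Nat) : (pvG0 n m).length = n * 5 := by
  simp [pvG0]

theorem pvG0_rowlen (n m r : Nat) (hr : r < n * 5) :
    ((pvG0 n m).getD r []).length = m * 5 := by
  rw [pvG0, pvGetD_map _ _ _ (by simpa using hr) _ 0]
  simp

theorem pvA_length (cave : List (List Int)) :
    (part2Map cave).length = cave.length * 5 := by
  rw [pvA_eq_foldN, pvFoldN_eq_cells, pvFold_length, pvG0_length]

theorem pvA_rowlen (cave : List (List Int)) (r : Nat) (hr : r < cave.length * 5) :
    ((part2Map cave).getD r []).length = (cave.headD []).length * 5 := by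
  rw [pvA_eq_foldN, pvFoldN_eq_cells, pvFold_rowlen, pvG0_rowlen _ _ _ hr]

theorem pvA_entry (cave : List (List Int)) (r c : Nat)
    (hr : r < cave.length * 5) (hc : c < (cave.headD []).length * 5) :
    pvReadC (part2Map cave) r c = pvTarget cave cave.length (cave.headD []).length r c := by
  rw [pvA_eq_foldN, pvFoldN_eq_cells,
      pvFold_read _ _ _ _ _ (by rw [pvG0_length]; exact hr) (by rw [pvG0_rowlen _ _ _ hr]; exact hc),
      if_pos (pvMem_cells _ _ _ _ hr hc)]

-- ===== B-side lemmas =====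

theorem pvGetD_flat5 {α : Type} (d : α) (f : Nat → List α) (n : Nat)
    (hl : ∀ k, k < 5 → (f k).length = n) (r : Nat) (hr : r < 5 * n) :
    ((((f 0 ++ f 1) ++ f 2) ++ f 3) ++ f 4).getD r d = (f (r / n)).getD (r % n) d := by
  have h0 := hl 0 (by omega); have h1 := hl 1 (by omega); have h2 := hl 2 (by omega)
  have h3 := hl 3 (by omega); have h4 := hl 4 (by omega)
  have dm := Nat.div_add_mod r n
  rcases Nat.lt_or_ge r n with hk | hk
  · have hd : r / n = 0 := Nat.div_eq_of_lt hk
    have hm : r % n = r := Nat.mod_eq_of_lt hk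
    rw [List.getD_append _ _ _ _ (by simp [h0, h1, h2, h3]; omega),
        List.getD_append _ _ _ _ (by simp [h0, h1, h2]; omega),
        List.getD_append _ _ _ _ (by simp [h0, h1]; omega),
        List.getD_append _ _ _ _ (by omega), hd, hm]
  rcases Nat.lt_or_ge r (2 * n) with hk2 | hk2
  · have hd : r / n = 1 := Nat.div_eq_of_lt_le (by omega) (by omega)
    have hm : r % n = r - n := by rw [hd] at dm; omega
    rw [List.getD_append _ _ _ _ (by simp [h0, h1, h2, h3]; omega),
        List.getD_append _ _ _ _ (by simp [h0, h1, h2]; omega),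
        List.getD_append _ _ _ _ (by simp [h0, h1]; omega),
        List.getD_append_right _ _ _ _ (by omega), hd, hm, h0]
  rcases Nat.lt_or_ge r (3 * n) with hk3 | hk3
  · have hd : r / n = 2 := Nat.div_eq_of_lt_le (by omega) (by omega)
    have hm : r % n = r - 2 * n := by rw [hd] at dm; omega
    rw [List.getD_append _ _ _ _ (by simp [h0, h1, h2, h3]; omega),
        List.getD_append _ _ _ _ (by simp [h0, h1, h2]; omega),
        List.getD_append_right _ _ _ _ (by simp [h0, h1]; omega), hd, hm]
    congr 1
    simp [h0, h1]
    omega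
  rcases Nat.lt_or_ge r (4 * n) with hk4 | hk4
  · have hd : r / n = 3 := Nat.div_eq_of_lt_le (by omega) (by omega)
    have hm : r % n = r - 3 * n := by rw [hd] at dm; omega
    rw [List.getD_append _ _ _ _ (by simp [h0, h1, h2, h3]; omega),
        List.getD_append_right _ _ _ _ (by simp [h0, h1, h2]; omega), hd, hm]
    congr 1
    simp [h0, h1, h2]
    omega
  · have hd : r / n = 4 := Nat.div_eq_of_lt_le (by omega) (by omega)
    have hm : r % n = r - 4 * n := by rw [hd] at dm; omega
    rw [List.getD_append_right _ _ _ _ (by simp [h0, h1, h2, h3]; omega), hd, hm]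
    congr 1
    simp [h0, h1, h2, h3]
    omega

-- the base map after row truncation, and B's row built from the nine shared shifted blocks
def pvBase (cave : List (List Int)) (m : Nat) : List (List Int) :=
  cave.map (fun row => row.take m)

def pvPiece (base : List (List Int)) (s i : Nat) : List Int :=
  pvShiftRow ((s : Nat) : Int) (base.getD i [])

def pvRowB (base : List (List Int)) (xt i : Nat) : List Int :=
  ((((pvPiece base (xt + 0) i ++ pvPiece base (xt + 1) i) ++ pvPiece base (xt + 2) i)
    ++ pvPiece base (xt + 3) i) ++ pvPiece base (xt + 4) i)

theorem pvShiftRow_length (s : Int) (row : List Int) :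
    (pvShiftRow s row).length = row.length := by
  simp [pvShiftRow]

theorem pvRange5 : List.range 5 = [0, 1, 2, 3, 4] := by decide

set_option maxHeartbeats 1000000 in
theorem pvB_eq (cave : List (List Int)) :
    part2Map_alt cave =
      (((((List.range cave.length).map (pvRowB (pvBase cave (cave.headD []).length) 0)
        ++ (List.range cave.length).map (pvRowB (pvBase cave (cave.headD []).length) 1))
        ++ (List.range cave.length).map (pvRowB (pvBase cave (cave.headD []).length) 2))
        ++ (List.range cave.length).map (pvRowB (pvBase cave (cave.headD []).length) 3))
        ++ (List.range cave.length).map (pvRowB (pvBase cave (cave.headD []).length) 4)) := by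
  have h0 : PySem.List.pyGetD cave 0 [] = cave.headD [] := by
    rw [show (0 : Int) = ((0 : Nat) : Int) from rfl, PySem.List.pyGetD_natCast, pvGetD_headD]
  have hbase : cave.map (fun row => PySem.List.slice row none (some (((cave.headD []).length : Nat) : Int)))
      = pvBase cave (cave.headD []).length := by
    simp [pvBase, PySem.List.slice_to_natCast]
  simp only [part2Map_alt, h0, hbase]
  set m := (cave.headD []).length with hm
  set base := pvBase cave m with hb
  have hlen : base.length = cave.length := by simp [hb, pvBase]
  rw [hlen]
  simp only [PySem.List.pyRange_zero, show ((5 : Int).toNat) = 5 from rfl,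
    show ((9 : Int).toNat) = 9 from rfl, Int.toNat_natCast, List.foldl_map]
  rw [PySem.List.foldl_append_singleton_eq_map, List.nil_append]
  -- replace the xt-loop body: for xt < 5 the inner fold appends the mapped block-row list
  rw [PySem.List.foldl_congr_mem (List.range 5) _
      (fun out (xt : Nat) => out ++ (List.range cave.length).map (pvRowB base xt)) [] ?_]
  · rw [pvRange5]
    simp only [List.foldl_cons, List.foldl_nil, List.nil_append]
  · intro out xt hxt
    rw [List.mem_range] at hxt
    -- replace the i-loop body: for i < n the row fold builds pvRowB base xt i
    rw [PySem.List.foldl_congr_mem (List.range cave.length) _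
        (fun out (i : Nat) => out ++ [pvRowB base xt i]) out ?_]
    · rw [PySem.List.foldl_append_singleton_eq_map]
    · intro acc i hi
      rw [List.mem_range] at hi
      have hi' : i < base.length := by rw [hlen]; exact hi
      have hpc : ∀ (yt : Nat), yt < 5 →
          PySem.List.pyGetD (PySem.List.pyGetD
            ((List.range 9).map (fun s => (base.map (pvShiftRow ((s : Nat) : Int)))))
            (((xt : Nat) : Int) + ((yt : Nat) : Int)) []) (((i : Nat) : Int)) []
          = pvPiece base (xt + yt) i := by
        intro yt hyt
        rw [show (((xt : Nat) : Int) + ((yt : Nat) : Int)) = (((xt + yt : Nat)) : Int) by push_cast; ring,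
            PySem.List.pyGetD_natCast, PySem.List.pyGetD_natCast]
        rw [pvGetD_map (fun s : Nat => List.map (pvShiftRow ((s : Nat) : Int)) base)
              (List.range 9) (xt + yt) (by simp; omega) [] 0]
        rw [List.getD_eq_getElem (List.range 9) 0 (by simp; omega), List.getElem_range]
        rw [pvGetD_map (pvShiftRow (((xt + yt : Nat)) : Int)) base i hi' [] []]
        rfl
      rw [PySem.List.foldl_congr_mem (List.range 5) _
          (fun r (yt : Nat) => r ++ pvPiece base (xt + yt) i) [] ?_]
      · rw [pvRange5]
        simp only [List.foldl_cons, List.foldl_nil, List.nil_append]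
        rfl
      · intro r yt hyt
        rw [List.mem_range] at hyt
        rw [hpc yt hyt]

theorem pvB_length (cave : List (List Int)) :
    (part2Map_alt cave).length = 5 * cave.length := by
  rw [pvB_eq]
  simp
  omega

theorem pvB_row (cave : List (List Int)) (r : Nat) (hr : r < 5 * cave.length) :
    (part2Map_alt cave).getD r [] =
      pvRowB (pvBase cave (cave.headD []).length) (r / cave.length) (r % cave.length) := by
  have hn : 0 < cave.length := by omega
  rw [pvB_eq]
  rw [pvGetD_flat5 ([] : List Int)
      (fun k => (List.range cave.length).map (pvRowB (pvBase cave (cave.headD []).length) k))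
      cave.length (by intro k _; simp) r hr]
  rw [pvGetD_map _ _ _ (by simp; exact Nat.mod_lt _ hn) _ 0,
      List.getD_eq_getElem _ _ (by simp; exact Nat.mod_lt _ hn), List.getElem_range]

theorem pvBaseRow (cave : List (List Int)) (m : Nat) (i : Nat) (hi : i < cave.length) :
    (pvBase cave m).getD i [] = (cave.getD i []).take m := by
  rw [pvBase, pvGetD_map _ _ _ hi _ []]

theorem pvBaseRow_length (cave : List (List Int)) (m : Nat) (i : Nat) (hi : i < cave.length)
    (hrow : m ≤ (cave.getD i []).length) : ((pvBase cave m).getD i []).length = m := by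
  rw [pvBaseRow _ _ _ hi, List.length_take]
  omega

theorem pvGetD_take (l : List Int) (mm j : Nat) (hj : j < mm) :
    (l.take mm).getD j 0 = l.getD j 0 := by
  rcases Nat.lt_or_ge j l.length with h | h
  · rw [List.getD_eq_getElem _ _ (by simp; omega), List.getD_eq_getElem _ _ h, List.getElem_take]
  · rw [List.getD_eq_default _ _ (by simp; omega), List.getD_eq_default _ _ h]

theorem pvShiftRow_getD (s : Int) (row : List Int) (j : Nat) (hj : j < row.length) :
    (pvShiftRow s row).getD j 0 = pvWrap9 (row.getD j 0 + s) := by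
  rw [pvShiftRow, pvGetD_map _ _ _ hj _ 0]
  rfl

theorem pvRowB_length (base : List (List Int)) (m xt i : Nat)
    (hrow : (base.getD i []).length = m) : (pvRowB base xt i).length = m * 5 := by
  simp only [pvRowB, List.length_append, pvPiece, pvShiftRow_length, hrow]
  omega

theorem pvRowB_getD (base : List (List Int)) (m xt i : Nat)
    (hrow : (base.getD i []).length = m) (c : Nat) (hc : c < 5 * m) :
    (pvRowB base xt i).getD c 0 =
      pvWrap9 ((base.getD i []).getD (c % m) 0 + ((xt + c / m : Nat) : Int)) := by
  have hm : 0 < m := by omega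
  rw [pvRowB,
      pvGetD_flat5 (0 : Int) (fun yt => pvPiece base (xt + yt) i) m
        (by intro k _; simp only [pvPiece, pvShiftRow_length, hrow]) c hc]
  rw [pvPiece, pvShiftRow_getD _ _ _ (by rw [hrow]; exact Nat.mod_lt _ hm)]

theorem pvB_entry (cave : List (List Int)) (r c : Nat)
    (hP : ∀ row ∈ cave, (cave.headD []).length ≤ row.length)
    (hr : r < 5 * cave.length) (hc : c < 5 * (cave.headD []).length) :
    ((part2Map_alt cave).getD r []).getD c 0 =
      pvTarget cave cave.length (cave.headD []).length r c := by
  have hn : 0 < cave.length := by omega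
  have hm : 0 < (cave.headD []).length := by omega
  have hi : r % cave.length < cave.length := Nat.mod_lt _ hn
  have hj : c % (cave.headD []).length < (cave.headD []).length := Nat.mod_lt _ hm
  have hrowmem : cave.getD (r % cave.length) [] ∈ cave := by
    rw [List.getD_eq_getElem _ _ hi]
    exact List.getElem_mem _
  have hrlen : ((pvBase cave (cave.headD []).length).getD (r % cave.length) []).length
      = (cave.headD []).length :=
    pvBaseRow_length _ _ _ hi (hP _ hrowmem)
  rw [pvB_row _ _ hr, pvRowB_getD _ _ _ _ hrlen c hc,
      pvBaseRow _ _ _ hi, pvGetD_take _ _ _ hj, pvTarget]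
  congr 1
  push_cast
  ring

-- ===== VERDICT (by name: the statement is the Claim_ definition above) =====
theorem part2Map_spec : Claim_equal_part2Map := by
  intro cave _ hPre
  obtain ⟨hne, hP⟩ := hPre
  unfold Spec_part2Map
  apply pvListEqOfGetD ([] : List Int)
  · rw [pvA_length, pvB_length]; ring
  · intro r hrA
    rw [pvA_length] at hrA
    apply pvListEqOfGetD (0 : Int)
    · rw [pvA_rowlen cave r hrA, pvB_row cave r (by omega)]
      have hi : r % cave.length < cave.length := Nat.mod_lt _ (by omega)
      have hrowmem : cave.getD (r % cave.length) [] ∈ cave := by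
        rw [List.getD_eq_getElem _ _ hi]
        exact List.getElem_mem _
      rw [pvRowB_length _ (cave.headD []).length _ _
          (pvBaseRow_length _ _ _ hi (hP _ hrowmem))]
    · intro c hcA
      rw [pvA_rowlen cave r hrA] at hcA
      have h1 := pvA_entry cave r c hrA hcA
      have h2 := pvB_entry cave r c hP (by omega) (by omega)
      rw [pvReadC] at h1
      rw [h1, h2]
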